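-- pv_equiv track=rewrite | github.com/BioML-CM/CalmBelt | calmbelt/lib/alignment.py | get_mutation_text
-- ===== SOURCE A (Python) =====
-- def get_mutation_text(m_list):
--     m_list = [m for m in m_list if (m[-1]!='N') and (m[-1]!='-') and ('*' not in m)]
--
--     if len(m_list) == 0 :
--         return '-'
--     elif len(m_list)<=3:
--         return ', '.join(m_list)
--     else:
--         m_text = ''
--         for i,m in enumerate(m_list):
--             m_text += m+', '
--             if (i%3)==2:
--                 m_text += '</br> '
--         if len(m_list)%3==0:
--             return m_text[:-8]
--         else:
--             return m_text[:-2]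
-- ===== SOURCE B (Python) =====
-- def get_mutation_text(m_list):
--     kept = [m for m in m_list if m[-1] != 'N' and m[-1] != '-' and '*' not in m]
--     if not kept:
--         return '-'
--     chunks = [', '.join(kept[i:i+3]) for i in range(0, len(kept), 3)]
--     return ', </br> '.join(chunks)
-- ===== Notes on version B (the rewrite author's own statement) =====
-- stated objective: simpler
-- what changed: Replaces the enumerate loop with index-modulo bookkeeping plus two suffix-stripping negative slices by chunking: join each 3-element slice with ', ' and join the chunks with ', </br> '; the len<=3 branch collapses into the single-chunk case, so no suffix trimming is needed.
-- outside the precondition, e.g. on get_mutation_text(['']): A raises IndexError, B raises IndexError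
import Mathlib
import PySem

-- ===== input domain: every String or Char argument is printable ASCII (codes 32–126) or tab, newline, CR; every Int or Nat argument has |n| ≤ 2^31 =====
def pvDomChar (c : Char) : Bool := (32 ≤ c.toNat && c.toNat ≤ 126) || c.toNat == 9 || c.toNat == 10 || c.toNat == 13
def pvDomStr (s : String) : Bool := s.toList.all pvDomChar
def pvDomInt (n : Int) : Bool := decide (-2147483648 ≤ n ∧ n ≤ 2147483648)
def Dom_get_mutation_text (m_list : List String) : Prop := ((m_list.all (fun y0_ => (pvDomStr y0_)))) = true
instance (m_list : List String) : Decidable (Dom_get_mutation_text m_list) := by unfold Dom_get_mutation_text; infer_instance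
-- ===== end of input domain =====

-- B replaces A's index-modulo loop plus suffix-stripping slices by joining 3-element chunks (simpler decomposition, same cost).


-- ===== PORT A =====
-- filter predicate of A's comprehension; m[-1] raises IndexError on the empty string (excluded by Pre_), PySem.Str.pyGet? returns none there
def pvKeep (m : String) : Bool :=
  match PySem.Str.pyGet? m (-1) with
  | some c => c != 'N' && c != '-' && !(PySem.Str.isIn "*" m)
  | none => false

def get_mutation_text (m_list : List String) : String :=
  let kept := m_list.filter pvKeep
  if kept.length = 0 then "-"
  else if kept.length ≤ 3 then PySem.Str.join ", " kept
  else
    let m_text := (PySem.List.enumerate kept 0).foldl (fun t (p : Int × String) =>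
      let t := t ++ p.2 ++ ", "
      if PySem.Int.mod p.1 3 = 2 then t ++ "</br> " else t) ""
    if kept.length % 3 = 0 then PySem.Str.slice m_text none (some (-8))
    else PySem.Str.slice m_text none (some (-2))

-- ===== PORT B =====
def get_mutation_text_alt (m_list : List String) : String :=
  let kept := m_list.filter pvKeep
  if kept.isEmpty then "-"
  else
    let chunks := (PySem.List.pyRange 0 kept.length 3).map
      (fun i => PySem.Str.join ", " (PySem.List.slice kept (some i) (some (i + 3))))
    PySem.Str.join ", </br> " chunks

-- ===== PRECONDITION & SPEC =====
-- Pre_ excludes lists containing the empty string, on which A raises IndexError at m[-1] (B raises there too).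
def Pre_get_mutation_text (m_list : List String) : Prop := ∀ m ∈ m_list, m ≠ ""
instance (m_list : List String) : Decidable (Pre_get_mutation_text m_list) := by
  unfold Pre_get_mutation_text; infer_instance
def pvWitness_get_mutation_text : List String :=
  ["A23T", "C5N", "K7*", "D10G", "del1-", "E2Q", "F3L", "G4S"]

def Spec_get_mutation_text (m_list : List String) (out : String) : Prop := out = get_mutation_text_alt m_list
instance (m_list : List String) (out : String) : Decidable (Spec_get_mutation_text m_list out) := by unfold Spec_get_mutation_text; infer_instance

-- ===== CLAIM (what is proved, stated in full; the proofs are below) =====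
def Claim_equal_get_mutation_text : Prop := ∀ (m_list : List String), Dom_get_mutation_text m_list → Pre_get_mutation_text m_list → Spec_get_mutation_text m_list (get_mutation_text m_list)

-- ===== LEMMAS AND PROOFS =====

-- proof-side recursive chunking: the common shape both ports are reduced to
def pvChunked (ms : List String) : String :=
  if ms.length ≤ 3 then PySem.Str.join ", " ms
  else PySem.Str.join ", " (ms.take 3) ++ ", </br> " ++ pvChunked (ms.drop 3)
termination_by ms.length
decreasing_by simp; omega

-- the characters A's loop appends for the elements of l when the enumeration counter starts at i
def pvBody : List String → Int → List Char
  | [], _ => []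
  | m :: rest, i =>
      m.toList ++ (", ".toList) ++
      (if PySem.Int.mod i 3 = 2 then "</br> ".toList else []) ++ pvBody rest (i + 1)

theorem pvLoop_eq (l : List String) (i : Int) (acc : String) :
    ((PySem.List.enumerate l i).foldl (fun t (p : Int × String) =>
      let t := t ++ p.2 ++ ", "
      if PySem.Int.mod p.1 3 = 2 then t ++ "</br> " else t) acc).toList
    = acc.toList ++ pvBody l i := by
  induction l generalizing i acc with
  | nil => simp [PySem.List.enumerate, pvBody]
  | cons m rest ih =>
      rw [PySem.List.enumerate_cons, List.foldl_cons, ih]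
      by_cases h : i % 3 = 2 <;> simp [pvBody, h]

theorem pvBody_shift (l : List String) (i : Int) : pvBody l (i + 3) = pvBody l i := by
  induction l generalizing i with
  | nil => rfl
  | cons m rest ih =>
      have h : PySem.Int.mod (i + 3) 3 = PySem.Int.mod i 3 := by
        simp [PySem.Int.mod, Int.fmod_eq_emod]
      simp only [pvBody, h]
      rw [show i + 3 + 1 = (i + 1) + 3 by ring, ih]

theorem pvShift3 (l : List String) : pvBody l 3 = pvBody l 0 := by
  have := pvBody_shift l 0
  simpa using this

theorem pvBody_cons3 (x y z : String) (t : List String) :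
    pvBody (x :: y :: z :: t) 0
      = (x.toList ++ ", ".toList ++ y.toList ++ ", ".toList ++ z.toList ++ ", </br> ".toList)
        ++ pvBody t 0 := by
  simp [pvBody, pvShift3,
        show "</br> ".toList = ['<', '/', 'b', 'r', '>', ' '] by decide,
        show ", </br> ".toList = [',', ' ', '<', '/', 'b', 'r', '>', ' '] by decide,
        show ", ".toList = [',', ' '] by decide]

theorem pvTake_sub_append (P s : List Char) (k : Nat) (h : k ≤ s.length) :
    (P ++ s).take ((P ++ s).length - k) = P ++ s.take (s.length - k) := by
  rw [List.length_append, show P.length + s.length - k = P.length + (s.length - k) by omega,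
      List.take_append]
  simp

theorem pvBody_len_ge (l : List String) (i : Int) : 2 * l.length ≤ (pvBody l i).length := by
  induction l generalizing i with
  | nil => simp [pvBody]
  | cons m rest ih =>
      simp only [pvBody, List.length_append, List.length_cons]
      have := ih (i + 1)
      split <;> simp <;> omega

-- main lemma on the A side: A's trimmed loop text equals recursive chunking, on any nonempty list
theorem pvMain (l : List String) (hne : l ≠ []) :
    (if l.length % 3 = 0 then (pvBody l 0).take ((pvBody l 0).length - 8)
     else (pvBody l 0).take ((pvBody l 0).length - 2)) = (pvChunked l).toList := by
  induction l using pvChunked.induct with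
  | case1 ms hle =>
      match ms, hne with
      | [], h => exact absurd rfl h
      | a :: b :: c :: d :: t, _ => simp only [List.length_cons] at hle; omega
      | [a], _ =>
          have hb : pvBody [a] 0 = a.toList ++ ", ".toList := by
            simp [pvBody]
          rw [pvChunked, if_neg (show ¬([a].length % 3 = 0) by simp),
              if_pos (show [a].length ≤ 3 by simp), hb,
              pvTake_sub_append a.toList (", ".toList) 2 (by decide)]
          simp [PySem.Str.toList_join, PySem.Chars.join_singleton]
      | [a, b], _ =>
          have hb : pvBody [a, b] 0 = (a.toList ++ ", ".toList ++ b.toList) ++ ", ".toList := by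
            simp [pvBody]
          rw [pvChunked, if_neg (show ¬([a, b].length % 3 = 0) by simp),
              if_pos (show [a, b].length ≤ 3 by simp), hb,
              pvTake_sub_append (a.toList ++ ", ".toList ++ b.toList) (", ".toList) 2 (by decide)]
          simp [PySem.Str.toList_join, PySem.Chars.join_cons_cons, PySem.Chars.join_singleton]
      | [a, b, c], _ =>
          have hb := pvBody_cons3 a b c []
          rw [show pvBody [] 0 = [] from rfl, List.append_nil] at hb
          rw [pvChunked, if_pos (show [a, b, c].length % 3 = 0 by simp),
              if_pos (show [a, b, c].length ≤ 3 by simp), hb]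
          rw [show (a.toList ++ ", ".toList ++ b.toList ++ ", ".toList ++ c.toList ++ ", </br> ".toList)
                = (a.toList ++ ", ".toList ++ b.toList ++ ", ".toList ++ c.toList) ++ ", </br> ".toList by simp,
              pvTake_sub_append _ _ 8 (by decide)]
          simp [PySem.Str.toList_join, PySem.Chars.join_cons_cons, PySem.Chars.join_singleton]
  | case2 ms hgt ih =>
      match ms, hne with
      | [], h => exact absurd rfl h
      | [a], _ => simp at hgt
      | [a, b], _ => simp at hgt
      | [a, b, c], _ => simp at hgt
      | a :: b :: c :: rest, _ =>
          have hrest : rest ≠ [] := by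
            intro h; subst h; simp at hgt
          rw [pvChunked, if_neg hgt]
          simp only [show (a :: b :: c :: rest).take 3 = [a, b, c] from rfl,
              show (a :: b :: c :: rest).drop 3 = rest from rfl] at ih ⊢
          have hbody := pvBody_cons3 a b c rest
          have hmod : (a :: b :: c :: rest).length % 3 = rest.length % 3 := by
            simp only [List.length_cons]; omega
          have hIH := ih hrest
          rw [hbody, hmod]
          by_cases h3 : rest.length % 3 = 0
          · have hlen8 : 8 ≤ (pvBody rest 0).length := by
              rcases rest with _ | ⟨x, _ | ⟨y, _ | ⟨z, t⟩⟩⟩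
              · exact absurd rfl hrest
              · simp at h3
              · simp at h3
              · rw [pvBody_cons3]
                simp
                omega
            rw [if_pos h3, pvTake_sub_append _ _ 8 hlen8]
            rw [if_pos h3] at hIH
            simp [hIH, PySem.Str.toList_join, PySem.Chars.join_cons_cons,
                  PySem.Chars.join_singleton,
                  show ", </br> ".toList = [',', ' ', '<', '/', 'b', 'r', '>', ' '] by decide]
          · have hlen2 : 2 ≤ (pvBody rest 0).length := by
              have := pvBody_len_ge rest 0
              cases rest with
              | nil => exact absurd rfl hrest
              | cons x t => simp at this ⊢; omega
            rw [if_neg h3, pvTake_sub_append _ _ 2 hlen2]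
            rw [if_neg h3] at hIH
            simp [hIH, PySem.Str.toList_join, PySem.Chars.join_cons_cons,
                  PySem.Chars.join_singleton,
                  show ", </br> ".toList = [',', ' ', '<', '/', 'b', 'r', '>', ' '] by decide]

-- B side: range(0, n, 3) steps off one chunk at a time
theorem pvRangeStep (n : Int) (h : 0 < n) :
    PySem.List.pyRange 0 n 3 = 0 :: (PySem.List.pyRange 0 (n - 3) 3).map (· + 3) := by
  rw [PySem.List.pyRange_of_pos _ _ (by norm_num : (0:Int) < 3),
      PySem.List.pyRange_of_pos _ _ (by norm_num : (0:Int) < 3)]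
  have hc1 : (if (0:Int) < n then ((n - 0 + 3 - 1) / 3).toNat else 0)
      = (if (0:Int) < n - 3 then ((n - 3 - 0 + 3 - 1) / 3).toNat else 0) + 1 := by
    rw [if_pos h]
    by_cases h3 : (0:Int) < n - 3
    · rw [if_pos h3]; omega
    · rw [if_neg h3]; omega
  rw [hc1, List.range_succ_eq_map]
  simp only [List.map_cons, List.map_map]
  refine congrArg₂ List.cons (by norm_num) ?_
  apply List.map_congr_left
  intro k _
  simp only [Function.comp_apply]
  push_cast
  ring

-- shifting a chunk start by 3 is slicing the dropped list
theorem pvSliceShift (x y z : String) (t : List String) (i : Int) (hi : 0 ≤ i) :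
    PySem.List.slice (x :: y :: z :: t) (some (i + 3)) (some (i + 3 + 3))
      = PySem.List.slice t (some i) (some (i + 3)) := by
  rw [PySem.List.slice_toNat _ (by omega) (by omega), PySem.List.slice_toNat _ hi (by omega)]
  rw [show (i + 3).toNat = i.toNat + 3 by omega, show (i + 3 + 3).toNat = i.toNat + 3 + 3 by omega]
  rw [show i.toNat + 3 + 3 - (i.toNat + 3) = 3 by omega, show i.toNat + 3 - i.toNat = 3 by omega,
      show i.toNat + 3 = i.toNat + 1 + 1 + 1 by omega]
  simp only [List.drop_succ_cons]

-- B's chunk comprehension equals recursive chunking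
set_option maxHeartbeats 1000000 in
theorem pvAltChunks (l : List String) :
    PySem.Str.join ", </br> " ((PySem.List.pyRange 0 l.length 3).map
      (fun i => PySem.Str.join ", " (PySem.List.slice l (some i) (some (i + 3)))))
    = pvChunked l := by
  induction l using pvChunked.induct with
  | case1 ms hle =>
      rw [pvChunked, if_pos hle]
      apply String.toList_inj.mp
      match ms, hle with
      | [], _ =>
          simp [PySem.Str.toList_join, PySem.Chars.join_nil,
                show PySem.List.pyRange 0 0 3 = [] by decide]
      | [a], _ =>
          rw [show (([a].length : Nat) : Int) = 1 by simp,
              show PySem.List.pyRange 0 1 3 = [(0:Int)] by decide]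
          simp [PySem.Str.toList_join, PySem.Chars.join_singleton,
                show PySem.List.slice [a] none (some 3) = [a] from rfl]
      | [a, b], _ =>
          rw [show (([a, b].length : Nat) : Int) = 2 by simp,
              show PySem.List.pyRange 0 2 3 = [(0:Int)] by decide]
          simp [PySem.Str.toList_join, PySem.Chars.join_singleton,
                show PySem.List.slice [a, b] none (some 3) = [a, b] from rfl]
      | [a, b, c], _ =>
          rw [show (([a, b, c].length : Nat) : Int) = 3 by simp,
              show PySem.List.pyRange 0 3 3 = [(0:Int)] by decide]
          simp [PySem.Str.toList_join, PySem.Chars.join_singleton,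
                show PySem.List.slice [a, b, c] none (some 3) = [a, b, c] from rfl]
  | case2 ms hgt ih =>
      match ms with
      | a :: b :: c :: x :: rest =>
          rw [pvChunked, if_neg hgt]
          simp only [show (a :: b :: c :: x :: rest).take 3 = [a, b, c] from rfl,
                     show (a :: b :: c :: x :: rest).drop 3 = x :: rest from rfl] at ih ⊢
          have hpos : (0:Int) < ((a :: b :: c :: x :: rest).length : Int) := by omega
          rw [pvRangeStep _ hpos, List.map_cons, List.map_map]
          have hlen : ((a :: b :: c :: x :: rest).length : Int) - 3 = ((x :: rest).length : Int) := by
            simp; omega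
          have hmap : ((PySem.List.pyRange 0 (((a :: b :: c :: x :: rest).length : Int) - 3) 3).map
              ((fun i => PySem.Str.join ", " (PySem.List.slice (a :: b :: c :: x :: rest) (some i) (some (i + 3)))) ∘ (· + 3)))
              = (PySem.List.pyRange 0 ((x :: rest).length : Int) 3).map
                  (fun i => PySem.Str.join ", " (PySem.List.slice (x :: rest) (some i) (some (i + 3)))) := by
            rw [hlen]
            apply List.map_congr_left
            intro i hi
            have hi0 : 0 ≤ i := by
              have := (PySem.List.mem_pyRange_iff_of_pos (by norm_num : (0:Int) < 3) i).mp hi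
              omega
            simp only [Function.comp_apply]
            rw [pvSliceShift a b c (x :: rest) i hi0]
          rw [hmap]
          apply String.toList_inj.mp
          rw [← ih]
          have hxr : (PySem.List.pyRange 0 ((x :: rest).length : Int) 3).map
              (fun i => PySem.Str.join ", " (PySem.List.slice (x :: rest) (some i) (some (i + 3))))
              = PySem.Str.join ", " (PySem.List.slice (x :: rest) (some 0) (some (0 + 3)))
                :: (PySem.List.pyRange 0 (((x :: rest).length : Int) - 3) 3).map
                    ((fun i => PySem.Str.join ", " (PySem.List.slice (x :: rest) (some i) (some (i + 3)))) ∘ (· + 3)) := by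
            rw [pvRangeStep _ (by omega), List.map_cons, List.map_map]
          rw [hxr, PySem.Str.toList_join, List.map_cons]
          cases hcs : ((PySem.List.pyRange 0 (((x :: rest).length : Int) - 3) 3).map
              ((fun i => PySem.Str.join ", " (PySem.List.slice (x :: rest) (some i) (some (i + 3)))) ∘ (· + 3))) with
          | nil =>
              simp [PySem.Str.toList_join, PySem.Chars.join_singleton,
                    show PySem.List.slice (a :: b :: c :: x :: rest) none (some 3) = [a, b, c] from rfl]
              rw [PySem.Chars.join_cons_cons, PySem.Chars.join_singleton]
              simp
          | cons c1 cs =>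
              rw [List.map_cons, PySem.Chars.join_cons_cons]
              simp [PySem.Str.toList_join, PySem.Chars.join_cons_cons, PySem.Chars.join_singleton,
                    show PySem.List.slice (a :: b :: c :: x :: rest) none (some 3) = [a, b, c] from rfl]
      | [] => simp at hgt
      | [a] => simp at hgt
      | [a, b] => simp at hgt
      | [a, b, c] => simp at hgt

-- ===== VERDICT (by name: the statement is the Claim_ definition above) =====
theorem get_mutation_text_spec : Claim_equal_get_mutation_text := by
  intro m_list _ _
  unfold Spec_get_mutation_text get_mutation_text get_mutation_text_alt
  set kept := m_list.filter pvKeep with hk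
  by_cases h0 : kept.length = 0
  · simp [List.length_eq_zero_iff.mp h0]
  · have hne : kept ≠ [] := fun h => h0 (by simp [h])
    rw [if_neg h0, if_neg (show ¬(kept.isEmpty = true) by simp only [List.isEmpty_iff]; exact hne)]
    rw [pvAltChunks kept]
    by_cases h3 : kept.length ≤ 3
    · rw [if_pos h3, pvChunked, if_pos h3]
    · rw [if_neg h3]
      apply String.toList_inj.mp
      have hloop := pvLoop_eq kept 0 ""
      have hmain := pvMain kept hne
      by_cases hm : kept.length % 3 = 0
      · rw [if_pos hm, PySem.Str.toList_slice]
        simp only [PySem.Chars.slice_eq_listSlice]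
        rw [hloop, PySem.List.slice_to_neg_ofNat _ 8 (by norm_num)]
        rw [if_pos hm] at hmain
        simpa using hmain
      · rw [if_neg hm, PySem.Str.toList_slice]
        simp only [PySem.Chars.slice_eq_listSlice]
        rw [hloop, PySem.List.slice_to_neg_ofNat _ 2 (by norm_num)]
        rw [if_neg hm] at hmain
        simpa using hmain
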